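-- pv_equiv track=rewrite | github.com/ahupp/diet-python | tests/integration_modules/named_expr_while_not.py | walk_until_truthy
-- ===== SOURCE A (Python) =====
-- def walk_until_truthy(values):
--     idx = 0
--     seen = []
--     while not (value := values[idx]):
--         seen.append(idx)
--         idx += 1
--         if idx > 3:
--             break
--     return seen, idx, value
-- ===== SOURCE B (Python) =====
-- def walk_until_truthy(values):
--     # staged passes: slice the bounded window, map to truthiness flags,
--     # then locate the first True flag by list.index
--     flags = [bool(v) for v in values[:4]]
--     if True in flags:
--         k = flags.index(True)
--         return list(range(k)), k, values[k]
--     return [0, 1, 2, 3], 4, values[3]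
-- ===== Notes on version B (the rewrite author's own statement) =====
-- stated objective: alternative
-- what changed: Replaces A's single while/walrus/break scan with a seen-accumulator by staged passes: slice the 4-element window, map it to boolean truthiness flags, find the first True via list.index, and compute seen in closed form as list(range(k)).
import Mathlib
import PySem

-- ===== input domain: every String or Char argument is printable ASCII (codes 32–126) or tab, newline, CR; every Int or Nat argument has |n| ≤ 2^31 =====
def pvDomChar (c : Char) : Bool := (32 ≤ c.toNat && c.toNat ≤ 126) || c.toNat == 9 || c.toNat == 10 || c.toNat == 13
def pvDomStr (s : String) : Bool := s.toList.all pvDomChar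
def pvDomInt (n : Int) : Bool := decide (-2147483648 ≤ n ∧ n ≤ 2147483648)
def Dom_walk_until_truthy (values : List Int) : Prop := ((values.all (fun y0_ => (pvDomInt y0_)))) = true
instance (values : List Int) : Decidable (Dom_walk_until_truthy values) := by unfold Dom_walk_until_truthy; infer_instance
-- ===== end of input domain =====

-- B replaces A's single while/walrus/break scan-with-accumulator by staged passes:
-- slice the 4-element window, map it to truthiness flags, locate the first True with
-- list.index, and build `seen` in closed form as list(range(k)); objective: simpler.

-- ===== PORT A =====
-- the while loop runs at most 4 iterations; fuel 5 is sufficient, the fuel-0 branch is unreachable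
def walkA_loop (values : List Int) : Nat → Int → List Int → List Int × Int × Int
  | 0, idx, seen => (seen, idx, 0)
  | fuel + 1, idx, seen =>
    match PySem.List.pyGet? values idx with
    | none => (seen, idx, 0)   -- IndexError; excluded by Pre_
    | some v =>
      if v = 0 then
        if idx + 1 > 3 then (seen ++ [idx], idx + 1, v)
        else walkA_loop values fuel (idx + 1) (seen ++ [idx])
      else (seen, idx, v)

def walk_until_truthy (values : List Int) : List Int × Int × Int :=
  walkA_loop values 5 0 []

-- ===== PORT B =====
def walk_until_truthy_alt (values : List Int) : List Int × Int × Int :=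
  let flags := (PySem.List.slice values none (some 4)).map (fun v => decide (v ≠ 0))
  if flags.contains true then
    match PySem.List.index? flags true with
    | none => ([], 0, 0)   -- unreachable: contains true guarantees an index
    | some k =>
      match PySem.List.pyGet? values (k : Int) with
      | none => ([], 0, 0)   -- unreachable: k indexes a slice of values
      | some v => (PySem.List.pyRange 0 (k : Int) 1, (k : Int), v)
  else
    match PySem.List.pyGet? values 3 with
    | none => ([], 0, 0)   -- IndexError; excluded by Pre_
    | some v => ([0, 1, 2, 3], 4, v)

-- ===== PRECONDITION & SPEC =====
-- Pre_ excludes exactly the inputs on which A raises IndexError: lists shorter than 4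
-- all of whose elements are zero (B raises IndexError there as well).
def Pre_walk_until_truthy (values : List Int) : Prop :=
  4 ≤ values.length ∨ ∃ v ∈ values, v ≠ 0
instance (values : List Int) : Decidable (Pre_walk_until_truthy values) := by
  unfold Pre_walk_until_truthy; infer_instance

def pvWitness_walk_until_truthy : List Int := [0, 7, 0]

def Spec_walk_until_truthy (values : List Int) (out : List Int × Int × Int) : Prop := out = walk_until_truthy_alt values
instance (values : List Int) (out : List Int × Int × Int) : Decidable (Spec_walk_until_truthy values out) := by unfold Spec_walk_until_truthy; infer_instance

-- ===== CLAIM (what is proved, stated in full; the proofs are below) =====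
def Claim_equal_walk_until_truthy : Prop := ∀ (values : List Int), Dom_walk_until_truthy values → Pre_walk_until_truthy values → Spec_walk_until_truthy values (walk_until_truthy values)

-- ===== LEMMAS AND PROOFS =====
theorem pyr0 : PySem.List.pyRange 0 0 1 = [] := by simp [PySem.List.pyRange_one]
theorem pyr1 : PySem.List.pyRange 0 1 1 = [0] := by simp [PySem.List.pyRange_one, List.range_succ]
theorem pyr2 : PySem.List.pyRange 0 2 1 = [0, 1] := by simp [PySem.List.pyRange_one, List.range_succ]
theorem pyr3 : PySem.List.pyRange 0 3 1 = [0, 1, 2] := by simp [PySem.List.pyRange_one, List.range_succ]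

theorem pg0 (x : Int) (xs : List Int) : PySem.List.pyGet? (x :: xs) 0 = some x := by
  simp [PySem.List.pyGet?, PySem.List.pyIdx?]
theorem pg1 (x y : Int) (xs : List Int) : PySem.List.pyGet? (x :: y :: xs) 1 = some y := by
  have h : (1:Int) = ((1:Nat):Int) := by norm_num
  rw [h, PySem.List.pyGet?_natCast]; simp
theorem pg2 (x y z : Int) (xs : List Int) : PySem.List.pyGet? (x :: y :: z :: xs) 2 = some z := by
  have h : (2:Int) = ((2:Nat):Int) := by norm_num
  rw [h, PySem.List.pyGet?_natCast]; simp
theorem pg3 (x y z w : Int) (xs : List Int) : PySem.List.pyGet? (x :: y :: z :: w :: xs) 3 = some w := by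
  have h : (3:Int) = ((3:Nat):Int) := by norm_num
  rw [h, PySem.List.pyGet?_natCast]; simp

theorem slice4 (values : List Int) :
    PySem.List.slice values none (some 4) = values.take 4 := by
  have h : (4:Int) = ((4:Nat):Int) := by norm_num
  rw [h, PySem.List.slice_to_natCast]

-- ===== VERDICT (by name: the statement is the Claim_ definition above) =====
theorem walk_until_truthy_spec : Claim_equal_walk_until_truthy := by
  intro values _ hpre
  unfold Spec_walk_until_truthy walk_until_truthy walk_until_truthy_alt
  rw [slice4]
  match values with
  | [] =>
    exfalso
    rcases hpre with h | ⟨v, hv, _⟩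
    · simp at h
    · simp at hv
  | [a] =>
    have ha : a ≠ 0 := by
      rcases hpre with h | ⟨v, hv, hne⟩
      · simp at h
      · simp at hv; simpa [hv] using hne
    simp [walkA_loop, PySem.List.index?_eq_idxOf?, List.idxOf?, List.findIdx?, List.findIdx?.go, pg0, pyr0, ha]
  | [a, b] =>
    by_cases ha : a = 0 <;> by_cases hb : b = 0
    · exfalso
      rcases hpre with h | ⟨v, hv, hne⟩
      · simp at h
      · simp at hv; rcases hv with h | h <;> simp [h, ha, hb] at hne
    all_goals
      simp [walkA_loop, PySem.List.index?_eq_idxOf?, List.idxOf?, List.findIdx?, List.findIdx?.go, pg0, pg1, pyr0, pyr1, ha, hb]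
  | [a, b, c] =>
    by_cases ha : a = 0 <;> by_cases hb : b = 0 <;> by_cases hc : c = 0
    · exfalso
      rcases hpre with h | ⟨v, hv, hne⟩
      · simp at h
      · simp at hv; rcases hv with h | h | h <;> simp [h, ha, hb, hc] at hne
    all_goals
      simp [walkA_loop, PySem.List.index?_eq_idxOf?, List.idxOf?, List.findIdx?, List.findIdx?.go, pg0, pg1, pg2, pyr0, pyr1, pyr2, ha, hb, hc]
  | a :: b :: c :: d :: rest =>
    by_cases ha : a = 0 <;> by_cases hb : b = 0 <;> by_cases hc : c = 0 <;> by_cases hd : d = 0 <;>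
      simp [walkA_loop, PySem.List.index?_eq_idxOf?, List.idxOf?, List.findIdx?, List.findIdx?.go, pg0, pg1, pg2, pg3, pyr0, pyr1, pyr2, pyr3, ha, hb, hc, hd]
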